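-- pv_equiv track=rewrite | github.com/DragonOfTheEast/kattisProblems | geneticsearch.py | _test_string_add_char
-- ===== SOURCE A (Python) =====
-- def _test_string(string, test_string):
--    ans = 0
--    index = 0
--    prev_ans = 0
--    while True:
--         prev_ans = string[index:].find(test_string)
--         if prev_ans == -1:
--             break
--         ans += 1
--         index += prev_ans +1
--    return ans
--
-- def _test_string_add_char(string, test_string):
--     seen = set()
--     ans = 0
--     for char in ['A', 'G', 'T', 'C']:
--         for index in range(len(test_string)+1):
--             temp = test_string[:index] + char + test_string[index:]
--             if temp in seen:
--                 continue
--             seen.add(temp)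
--             ans += _test_string(string, temp)
--     return ans
-- ===== SOURCE B (Python) =====
-- def _inserted_char(w, t):
--     # two-pointer walk: the char inserted into t to obtain w, or None if w is not
--     # t with exactly one char inserted
--     if not t:
--         return w[0] if len(w) == 1 else None
--     if w[0] == t[0]:
--         return _inserted_char(w[1:], t[1:])
--     return w[0] if w[1:] == t else None
--
--
-- def _test_string_add_char(string, test_string):
--     m = len(test_string)
--     ans = 0
--     for i in range(len(string) - m):
--         c = _inserted_char(string[i:i + m + 1], test_string)
--         if c is not None and c in 'AGTC':
--             ans += 1
--     return ans
-- ===== Notes on version B (the rewrite author's own statement) =====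
-- stated objective: faster
-- what changed: Instead of generating all 4*(m+1) one-char-insertion candidates behind a seen-set and running a repeated str.find scan for each, B slides one window of length m+1 over the string and decides structurally, by a single two-pointer walk per window, whether the window is test_string with exactly one AGTC character inserted.
import Mathlib
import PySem

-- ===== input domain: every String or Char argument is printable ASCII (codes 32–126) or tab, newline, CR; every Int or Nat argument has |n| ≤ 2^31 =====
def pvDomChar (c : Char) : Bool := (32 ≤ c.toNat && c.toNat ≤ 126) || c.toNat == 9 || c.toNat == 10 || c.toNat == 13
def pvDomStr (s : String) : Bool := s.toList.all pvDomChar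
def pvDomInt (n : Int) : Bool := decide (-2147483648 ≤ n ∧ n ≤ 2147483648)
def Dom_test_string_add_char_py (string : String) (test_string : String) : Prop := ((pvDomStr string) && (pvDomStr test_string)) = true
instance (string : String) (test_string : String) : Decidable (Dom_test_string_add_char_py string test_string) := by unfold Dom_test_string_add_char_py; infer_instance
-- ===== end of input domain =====

-- B replaces A's candidate-set-plus-repeated-find search by a single sliding-window scan
-- that tests each window with a two-pointer walk (objective: faster).

-- ===== PORT A =====
-- the while-loop of helper _test_string, with a fuel bound (index grows by at least 1 per
-- iteration and the loop exits once the slice is shorter than the nonempty needle, so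
-- s.length + 1 iterations always suffice; proved in pvTestStringA_eq below)
def pvTestStringA (s t : List Char) : Nat → Int → Int → Int
  | 0, _, ans => ans
  | fuel + 1, index, ans =>
    let prev := PySem.Chars.find (PySem.List.slice s (some index) none) t
    if prev = -1 then ans
    else pvTestStringA s t fuel (index + prev + 1) (ans + 1)

def test_string_add_char_py (string : String) (test_string : String) : Int :=
  let s := string.toList
  let t := test_string.toList
  (['A', 'G', 'T', 'C'].foldl (fun (st : PySem.Set (List Char) × Int) char =>
      (PySem.List.pyRange 0 ((t.length : Int) + 1) 1).foldl (fun st index =>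
        let temp := PySem.List.slice t none (some index) ++ [char] ++ PySem.List.slice t (some index) none
        if PySem.Set.contains st.1 temp then st
        else (PySem.Set.add st.1 temp, st.2 + pvTestStringA s temp (s.length + 1) 0 0)) st)
    (PySem.Set.empty, 0)).2

-- ===== PORT B =====
-- helper _inserted_char: two-pointer walk returning the char inserted into t to obtain w
def pvInsertedChar : List Char → List Char → Option Char
  | w, [] => match w with | [c] => some c | _ => none
  | [], _ :: _ => none
  | c :: w', d :: t' => if c = d then pvInsertedChar w' t' else if w' = d :: t' then some c else none

def test_string_add_char_py_alt (string : String) (test_string : String) : Int :=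
  let s := string.toList
  let t := test_string.toList
  let m := t.length
  (PySem.List.pyRange 0 ((s.length : Int) - (m : Int)) 1).foldl (fun ans i =>
    match pvInsertedChar (PySem.List.slice s (some i) (some (i + (m : Int) + 1))) t with
    | some c => if c ∈ ['A', 'G', 'T', 'C'] then ans + 1 else ans
    | none => ans) 0

-- ===== PRECONDITION & SPEC =====
def Spec_test_string_add_char_py (string : String) (test_string : String) (out : Int) : Prop := out = test_string_add_char_py_alt string test_string
instance (string : String) (test_string : String) (out : Int) : Decidable (Spec_test_string_add_char_py string test_string out) := by unfold Spec_test_string_add_char_py; infer_instance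

-- ===== CLAIM (what is proved, stated in full; the proofs are below) =====
def Claim_equal_test_string_add_char_py : Prop := ∀ (string : String) (test_string : String), Dom_test_string_add_char_py string test_string → Spec_test_string_add_char_py string test_string (test_string_add_char_py string test_string)

-- ===== LEMMAS AND PROOFS =====

-- t with c inserted at position k (k ≤ t.length): t[:k] + c + t[k:]
def pvIns (k : Nat) (c : Char) (t : List Char) : List Char := t.take k ++ c :: t.drop k

-- the window of length t.length+1 starting at i
def pvWin (s t : List Char) (i : Nat) : List Char := (s.drop i).take (t.length + 1)

-- the predicate B evaluates at each start position
def pvG (s t : List Char) (i : Nat) : Bool :=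
  match pvInsertedChar (pvWin s t i) t with
  | some c => decide (c ∈ ['A', 'G', 'T', 'C'])
  | none => false

-- number of (overlapping) occurrence positions of temp inside u
def pvCnt (u temp : List Char) : Nat := (List.range u.length).countP (fun j => decide (temp <+: u.drop j))

-- the candidate list A enumerates (before deduplication by the seen set)
def pvCL (t : List Char) : List (List Char) :=
  ['A', 'G', 'T', 'C'].flatMap (fun c => (List.range (t.length + 1)).map (fun k => pvIns k c t))

lemma pvInserted_length : ∀ (w t : List Char) (c : Char), pvInsertedChar w t = some c → w.length = t.length + 1 := by
  intro w t
  induction t generalizing w with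
  | nil =>
    intro c h
    match w, h with
    | [c'], h => simp
  | cons d t' ih =>
    intro c h
    match w, h with
    | c' :: w', h =>
      simp only [pvInsertedChar] at h
      split at h
      · simpa using ih w' c h
      · split at h
        · simp_all
        · exact absurd h (by simp)

lemma pvInserted_ins : ∀ (t : List Char) (k : Nat) (c : Char), k ≤ t.length → pvInsertedChar (pvIns k c t) t = some c := by
  intro t
  induction t with
  | nil =>
    intro k c hk
    have hk0 : k = 0 := Nat.le_zero.mp hk
    subst hk0
    rfl
  | cons d t' ih =>
    intro k c hk
    cases k with
    | zero =>
      by_cases hc : c = d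
      · subst hc
        have : pvIns 0 c (c :: t') = c :: pvIns 0 c t' := by simp [pvIns]
        rw [this]
        simp only [pvInsertedChar]
        exact ih 0 c (Nat.zero_le _)
      · simp [pvIns, pvInsertedChar, hc]
    | succ k' =>
      have : pvIns (k' + 1) c (d :: t') = d :: pvIns k' c t' := by simp [pvIns]
      rw [this]
      simp only [pvInsertedChar]
      exact ih k' c (by simpa using hk)

lemma pvInserted_some : ∀ (t w : List Char) (c : Char), pvInsertedChar w t = some c → ∃ k, k ≤ t.length ∧ w = pvIns k c t := by
  intro t
  induction t with
  | nil =>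
    intro w c h
    match w, h with
    | [c'], h =>
      refine ⟨0, by simp, ?_⟩
      simp only [pvInsertedChar] at h
      simp_all [pvIns]
  | cons d t' ih =>
    intro w c h
    match w, h with
    | c' :: w', h =>
      simp only [pvInsertedChar] at h
      split at h
      · obtain ⟨k, hk, hw⟩ := ih w' c h
        rename_i hc
        exact ⟨k + 1, by simpa using hk, by simp [pvIns, hc, hw]⟩
      · split at h
        · rename_i hw
          refine ⟨0, by simp, ?_⟩
          simp_all [pvIns]
        · exact absurd h (by simp)

lemma pvCnt_zero (u t' : List Char) (h : ¬ t' <:+: u) : pvCnt u t' = 0 := by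
  unfold pvCnt
  rw [List.countP_eq_zero]
  intro j _
  simp only [decide_eq_true_eq]
  intro hp
  exact h (hp.isInfix.trans (List.drop_suffix j u).isInfix)

lemma pvCnt_succ (u t' : List Char) (K : Nat) (ht : t' ≠ [])
    (h1 : t' <+: u.drop K) (h2 : ∀ j < K, ¬ t' <+: u.drop j) :
    pvCnt u t' = pvCnt (u.drop (K + 1)) t' + 1 := by
  have hKlt : K < u.length := by
    by_contra hK
    have : u.drop K = [] := List.drop_eq_nil_of_le (by omega)
    rw [this] at h1
    exact ht (List.prefix_nil.mp h1)
  have hsplit : u.length = (K + 1) + (u.length - (K + 1)) := by omega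
  unfold pvCnt
  rw [List.length_drop]
  conv_lhs => rw [hsplit]
  rw [List.range_add, List.countP_append, List.countP_map]
  have hfirst : (List.range (K + 1)).countP (fun j => decide (t' <+: u.drop j)) = 1 := by
    rw [List.range_succ, List.countP_append, List.countP_eq_zero.mpr (by
      intro j hj
      simp only [decide_eq_true_eq]
      exact h2 j (List.mem_range.mp hj))]
    simp [h1]
  rw [hfirst]
  have hcomp : ∀ j, ((fun j => decide (t' <+: u.drop j)) ∘ (fun x => K + 1 + x)) j
      = (fun j => decide (t' <+: (u.drop (K + 1)).drop j)) j := by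
    intro j
    simp only [Function.comp]
    rw [List.drop_drop]
  rw [List.countP_congr (fun x _ => by rw [hcomp x])]
  omega

lemma pvTestStringA_eq (s t' : List Char) (ht : t' ≠ []) :
    ∀ (fuel : Nat) (index : Nat) (ans : Int), (s.drop index).length < fuel →
    pvTestStringA s t' fuel (index : Int) ans = ans + (pvCnt (s.drop index) t' : Int) := by
  intro fuel
  induction fuel with
  | zero => intro index ans h; omega
  | succ fuel ih =>
    intro index ans h
    have hslice : PySem.List.slice s (some (index : Int)) none = s.drop index :=
      PySem.List.slice_from_natCast ..
    set u := s.drop index with hu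
    simp only [pvTestStringA, hslice]
    by_cases hfind : PySem.Chars.find u t' = -1
    · rw [if_pos hfind]
      rw [pvCnt_zero u t' ((PySem.Chars.find_eq_neg_one_iff u t').mp hfind)]
      simp
    · rw [if_neg hfind]
      have hnn : 0 ≤ PySem.Chars.find u t' := by
        rcases (PySem.Chars.neg_one_le_find u t').lt_or_eq with h' | h'
        · omega
        · exact absurd h'.symm hfind
      obtain ⟨hpref, hmin⟩ := PySem.Chars.find_spec (s := u) (sub := t') hnn
      set K := (PySem.Chars.find u t').toNat with hK
      have hidx : (index : Int) + PySem.Chars.find u t' + 1 = ((index + K + 1 : Nat) : Int) := by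
        push_cast; omega
      rw [hidx]
      have hdrop : s.drop (index + K + 1) = u.drop (K + 1) := by
        rw [hu, List.drop_drop, Nat.add_assoc]
      have hKlt : K < u.length := by
        by_contra hc
        have : u.drop K = [] := List.drop_eq_nil_of_le (by omega)
        rw [this] at hpref
        exact ht (List.prefix_nil.mp hpref)
      have hlen : (s.drop (index + K + 1)).length < fuel := by
        rw [hdrop, List.length_drop]
        omega
      rw [ih (index + K + 1) (ans + 1) hlen, hdrop]
      rw [pvCnt_succ u t' K ht hpref (fun j hj => hmin j hj)]
      push_cast
      ring

-- the seen-set/accumulator fold of A, for an arbitrary per-candidate value f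
lemma pvFold_eq (f : List Char → Int) :
    ∀ (L : List (List Char)) (seen : PySem.Set (List Char)) (acc : Int),
    L.foldl (fun st temp => if PySem.Set.contains st.1 temp then st
      else (PySem.Set.add st.1 temp, st.2 + f temp)) (seen, acc)
    = (PySem.Set.update seen L,
       acc + (((PySem.Set.update seen L).drop seen.length).map f).sum) := by
  intro L
  induction L with
  | nil =>
    intro seen acc
    simp [PySem.Set.update_nil]
  | cons x L ih =>
    intro seen acc
    simp only [List.foldl_cons, PySem.Set.update_cons]
    by_cases hx : x ∈ seen
    · rw [if_pos ((PySem.Set.contains_iff seen x).mpr hx), PySem.Set.add_of_mem hx]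
      exact ih seen acc
    · have hc : ¬ PySem.Set.contains seen x = true := by
        rw [PySem.Set.contains_iff]; exact hx
      rw [if_neg hc, PySem.Set.add_of_not_mem hx, ih (seen ++ [x]) (acc + f x)]
      have hupd := PySem.Set.update_eq_append_filter (seen ++ [x]) L
      set rest := ((PySem.Set.ofList L).filter (fun y => !(PySem.Set.contains (seen ++ [x]) y))) with hrest
      have h1 : ((seen ++ [x]).update L).drop (seen.length + 1) = rest := by
        rw [hupd]; exact List.drop_left' (by simp)
      have h2 : ((seen ++ [x]).update L).drop seen.length = x :: rest := by
        rw [hupd, List.append_assoc]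
        rw [List.drop_left]
        rfl
      have h3 : (seen ++ [x]).length = seen.length + 1 := by simp
      rw [h3, h1, h2]
      simp only [List.map_cons, List.sum_cons]
      refine Prod.ext rfl ?_
      simp only
      ring
lemma pvSum_indicator (y : List Char) : ∀ (D : List (List Char)), D.Nodup →
    (D.map (fun x => if y = x then (1 : Int) else 0)).sum = if y ∈ D then 1 else 0 := by
  intro D
  induction D with
  | nil => simp
  | cons x D ih =>
    intro h
    rcases List.nodup_cons.mp h with ⟨hx, hD⟩
    simp only [List.map_cons, List.sum_cons, ih hD]
    by_cases hxy : y = x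
    · subst hxy
      simp [hx]
    · simp [hxy]

lemma pvSum_countP (f : Nat → List Char) (D : List (List Char)) (hD : D.Nodup) :
    ∀ (l : List Nat),
    (D.map (fun x => ((l.countP (fun i => decide (f i = x)) : Nat) : Int))).sum
      = ((l.countP (fun i => decide (f i ∈ D)) : Nat) : Int) := by
  intro l
  induction l with
  | nil => simp
  | cons a l ih =>
    simp only [List.countP_cons]
    have hsplit : (D.map (fun x => (((l.countP (fun i => decide (f i = x))
        + if decide (f a = x) then 1 else 0 : Nat)) : Int))).sum
        = (D.map (fun x => ((l.countP (fun i => decide (f i = x)) : Nat) : Int))).sum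
          + (D.map (fun x => if f a = x then (1 : Int) else 0)).sum := by
      rw [← PySem.List.sum_map_add_int]
      congr 1
      apply List.map_congr_left
      intro x _
      by_cases h : f a = x <;> simp [h]
    rw [hsplit, ih, pvSum_indicator (f a) D hD]
    by_cases h : f a ∈ D <;> simp [h]

lemma pvG_iff (s t : List Char) (i : Nat) :
    pvG s t i = true ↔ ∃ c, pvInsertedChar (pvWin s t i) t = some c ∧ c ∈ ['A', 'G', 'T', 'C'] := by
  unfold pvG
  cases h : pvInsertedChar (pvWin s t i) t <;> simp

lemma pvMem_CL (t w : List Char) :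
    w ∈ PySem.Set.ofList (pvCL t) ↔ ∃ c, pvInsertedChar w t = some c ∧ c ∈ ['A', 'G', 'T', 'C'] := by
  rw [PySem.Set.mem_ofList]
  unfold pvCL
  simp only [List.mem_flatMap, List.mem_map, List.mem_range]
  constructor
  · rintro ⟨c, hc, k, hk, rfl⟩
    exact ⟨c, pvInserted_ins t k c (by omega), hc⟩
  · rintro ⟨c, hch, hc⟩
    obtain ⟨k, hk, rfl⟩ := pvInserted_some t w c hch
    exact ⟨c, hc, k, by omega, rfl⟩

lemma pvG_false (s t : List Char) (i : Nat) (h : s.length ≤ i + t.length) : pvG s t i = false := by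
  unfold pvG
  cases hc : pvInsertedChar (pvWin s t i) t with
  | none => rfl
  | some c =>
    exfalso
    have hl := pvInserted_length _ _ _ hc
    have hwl : (pvWin s t i).length = min (t.length + 1) (s.length - i) := by
      simp [pvWin]
    omega

lemma pvIns_length (t : List Char) (k : Nat) (c : Char) (hk : k ≤ t.length) :
    (pvIns k c t).length = t.length + 1 := by
  simp only [pvIns, List.length_append, List.length_take, List.length_cons, List.length_drop]
  omega

lemma pvA_eq (string test_string : String) :
    test_string_add_char_py string test_string
      = (((List.range string.toList.length).countP (pvG string.toList test_string.toList) : Nat) : Int) := by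
  set s := string.toList with hs
  set t := test_string.toList with htl
  set step := fun (st : PySem.Set (List Char) × Int) (temp : List Char) =>
    if PySem.Set.contains st.1 temp then st
    else (PySem.Set.add st.1 temp, st.2 + pvTestStringA s temp (s.length + 1) 0 0) with hstep
  have hinner : ∀ (c : Char) (st : PySem.Set (List Char) × Int),
      (PySem.List.pyRange 0 ((t.length : Int) + 1) 1).foldl (fun st index =>
        step st (PySem.List.slice t none (some index) ++ [c] ++ PySem.List.slice t (some index) none)) st
      = ((List.range (t.length + 1)).map (fun k => pvIns k c t)).foldl step st := by
    intro c st
    rw [PySem.List.pyRange_one]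
    have hnn : ((t.length : Int) + 1 - 0).toNat = t.length + 1 := by omega
    rw [hnn, List.foldl_map, List.foldl_map]
    apply PySem.List.foldl_congr_mem
    intro acc k hk
    have h0 : (0 : Int) + (k : Int) = (k : Int) := by omega
    rw [h0, PySem.List.slice_to_natCast, PySem.List.slice_from_natCast]
    congr 1
    simp [pvIns]
  have hflat : ∀ (init : PySem.Set (List Char) × Int),
      ['A', 'G', 'T', 'C'].foldl (fun st c =>
        ((List.range (t.length + 1)).map (fun k => pvIns k c t)).foldl step st) init
      = (pvCL t).foldl step init := by
    intro init
    rw [pvCL, List.flatMap, List.foldl_flatten, List.foldl_map]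
  have hbody : test_string_add_char_py string test_string
      = (['A', 'G', 'T', 'C'].foldl (fun st c =>
          ((List.range (t.length + 1)).map (fun k => pvIns k c t)).foldl step st)
         ((PySem.Set.empty : PySem.Set (List Char)), (0 : Int))).2 := by
    show (['A', 'G', 'T', 'C'].foldl (fun st c =>
        (PySem.List.pyRange 0 ((t.length : Int) + 1) 1).foldl (fun st index =>
          step st (PySem.List.slice t none (some index) ++ [c] ++ PySem.List.slice t (some index) none)) st)
        ((PySem.Set.empty : PySem.Set (List Char)), (0 : Int))).2 = _
    congr 1
    exact PySem.List.foldl_congr_mem _ _ _ _ (fun acc c _ => hinner c acc)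
  rw [hbody, hflat, pvFold_eq, PySem.Set.update_empty]
  have hempty : (PySem.Set.empty : PySem.Set (List Char)).length = 0 := rfl
  rw [hempty, List.drop_zero, zero_add]
  have hocc : ∀ x ∈ PySem.Set.ofList (pvCL t), pvTestStringA s x (s.length + 1) 0 0
      = (((List.range s.length).countP (fun i => decide (pvWin s t i = x)) : Nat) : Int) := by
    intro x hx
    have hx' : x ∈ pvCL t := (PySem.Set.mem_ofList ..).mp hx
    unfold pvCL at hx'
    simp only [List.mem_flatMap, List.mem_map, List.mem_range] at hx'
    obtain ⟨c, _, k, hk, rfl⟩ := hx'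
    have hne : pvIns k c t ≠ [] := by simp [pvIns]
    have hlen : (pvIns k c t).length = t.length + 1 := pvIns_length t k c (by omega)
    have h0 : pvTestStringA s (pvIns k c t) (s.length + 1) ((0 : Nat) : Int) 0
        = 0 + (pvCnt (s.drop 0) (pvIns k c t) : Int) :=
      pvTestStringA_eq s (pvIns k c t) hne (s.length + 1) 0 0 (by simp)
    simp only [Nat.cast_zero] at h0
    rw [h0, List.drop_zero, zero_add]
    congr 1
    unfold pvCnt
    apply List.countP_congr
    intro i _
    simp only [decide_eq_true_eq]
    rw [List.prefix_iff_eq_take, hlen]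
    unfold pvWin
    constructor <;> exact fun h => h.symm
  rw [List.map_congr_left hocc,
      pvSum_countP (pvWin s t) (PySem.Set.ofList (pvCL t)) (PySem.Set.nodup_ofList _)]
  dsimp only
  congr 1
  apply List.countP_congr
  intro i _
  simp only [decide_eq_true_eq]
  rw [pvMem_CL, ← pvG_iff]

lemma pvB_eq (string test_string : String) :
    test_string_add_char_py_alt string test_string
      = (((List.range (((string.toList.length : Int) - (test_string.toList.length : Int)).toNat)).countP
          (pvG string.toList test_string.toList) : Nat) : Int) := by
  set s := string.toList with hs
  set t := test_string.toList with htl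
  have hb : test_string_add_char_py_alt string test_string
      = (PySem.List.pyRange 0 ((s.length : Int) - (t.length : Int)) 1).foldl (fun ans i =>
          match pvInsertedChar (PySem.List.slice s (some i) (some (i + (t.length : Int) + 1))) t with
          | some c => if c ∈ ['A', 'G', 'T', 'C'] then ans + 1 else ans
          | none => ans) 0 := rfl
  rw [hb, PySem.List.pyRange_one]
  have h0 : ((s.length : Int) - (t.length : Int) - 0).toNat = ((s.length : Int) - (t.length : Int)).toNat := by
    omega
  rw [h0, List.foldl_map]
  have hcongr : ∀ (acc : Int) (k : Nat), k ∈ List.range (((s.length : Int) - (t.length : Int)).toNat) →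
      (match pvInsertedChar (PySem.List.slice s (some ((0 : Int) + (k : Int)))
          (some ((0 : Int) + (k : Int) + (t.length : Int) + 1))) t with
        | some c => if c ∈ ['A', 'G', 'T', 'C'] then acc + 1 else acc
        | none => acc)
      = if pvG s t k then acc + 1 else acc := by
    intro acc k _
    have h1 : (0 : Int) + (k : Int) = (k : Int) := by omega
    have h2 : (0 : Int) + (k : Int) + (t.length : Int) + 1 = (k : Int) + ((t.length + 1 : Nat) : Int) := by
      push_cast; ring
    rw [h1] at h2 ⊢
    rw [h2, PySem.List.slice_natCast_add]
    unfold pvG pvWin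
    cases hc : pvInsertedChar ((s.drop k).take (t.length + 1)) t <;> simp
  rw [PySem.List.foldl_congr_mem _ _ _ _ hcongr, PySem.List.foldl_if_add_one]
  simp

lemma pvTrim (s t : List Char) :
    (List.range s.length).countP (pvG s t)
      = (List.range (((s.length : Int) - (t.length : Int)).toNat)).countP (pvG s t) := by
  set K := ((s.length : Int) - (t.length : Int)).toNat with hK
  have hKle : K ≤ s.length := by omega
  have hsplit : s.length = K + (s.length - K) := by omega
  conv_lhs => rw [hsplit]
  rw [List.range_add, List.countP_append, List.countP_map]
  have hz : (List.range (s.length - K)).countP ((pvG s t) ∘ (fun x => K + x)) = 0 := by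
    apply List.countP_eq_zero.mpr
    intro j _
    simp only [Function.comp]
    rw [pvG_false s t (K + j) (by omega)]
    simp
  rw [hz]
  omega

-- ===== VERDICT (by name: the statement is the Claim_ definition above) =====
theorem test_string_add_char_py_spec : Claim_equal_test_string_add_char_py := by
  intro string test_string _
  unfold Spec_test_string_add_char_py
  rw [pvA_eq, pvB_eq, pvTrim]
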